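-- pv_equiv track=rewrite | github.com/YiqunGan/Big-data-mining-with-Python-and-Spark | Big data mining with Python and Spark/yiqun_gan_hw2/yiqun_gan_task2.py | get_shingle_dict
-- ===== SOURCE A (Python) =====
-- def get_shingle_dict(tokens_list):
--     #db mappings each shingle to an unique index. shingle->index
--     db = {}
--     shingles = [] #list of set
--
--     for tokens in tokens_list:
--
--         shingle = set()
--         for token in tokens:
--             #frozenset to make it order independent and hashable
--
--             #same idea in week2, get_item_dict
--             if token not in db:
--                 db[token] = len(db)
--
--             shingle.add(db[token])
--         shingles.append(shingle)
--
--     return shingles, db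
-- ===== SOURCE B (Python) =====
-- def get_shingle_dict(tokens_list):
--     # flatten the token stream, dedupe it keeping first occurrences, number the vocabulary
--     flat = [t for ts in tokens_list for t in ts]
--     db = {t: i for i, t in enumerate(dict.fromkeys(flat))}
--     return [{db[t] for t in ts} for ts in tokens_list], db
-- ===== Notes on version B (the rewrite author's own statement) =====
-- stated objective: idiomatic
-- what changed: B has no membership guard and no incremental len(db) counter: it flattens the token stream, dedupes it with dict.fromkeys (first occurrences kept in order), numbers that vocabulary with enumerate, and builds each shingle set by pure lookups.
import Mathlib
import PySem

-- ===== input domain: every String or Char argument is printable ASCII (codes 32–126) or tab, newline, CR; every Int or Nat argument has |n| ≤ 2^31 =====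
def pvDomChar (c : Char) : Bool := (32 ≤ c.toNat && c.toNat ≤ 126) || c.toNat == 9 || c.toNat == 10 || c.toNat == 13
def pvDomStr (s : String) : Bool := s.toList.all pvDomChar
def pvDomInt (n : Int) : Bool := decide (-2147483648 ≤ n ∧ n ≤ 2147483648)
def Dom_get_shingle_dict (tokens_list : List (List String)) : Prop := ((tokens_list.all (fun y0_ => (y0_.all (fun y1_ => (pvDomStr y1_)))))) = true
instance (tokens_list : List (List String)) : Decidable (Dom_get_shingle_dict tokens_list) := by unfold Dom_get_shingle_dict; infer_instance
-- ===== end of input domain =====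

-- B drops A's membership guard and incremental counter: it flattens the tokens, dedupes with dict.fromkeys, numbers the vocabulary with enumerate, and builds shingles by pure lookups (objective: idiomatic).

-- ===== PORT A =====
def get_shingle_dict (tokens_list : List (List String)) : List (List Int) × (List (String × Int)) :=
  let st := tokens_list.foldl
    (fun (st : PySem.Dict String Int × List (List Int)) tokens =>
      let inner := tokens.foldl
        (fun (st2 : PySem.Dict String Int × PySem.Set Int) token =>
          let db := if st2.1.contains token then st2.1 else st2.1.insert token (st2.1.size : Int)
          -- db[token]: token is present after the 'if', so getD … 0 is exact here
          (db, PySem.Set.add st2.2 (PySem.Dict.getD db token 0)))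
        (st.1, PySem.Set.empty)
      (inner.1, st.2 ++ [inner.2]))
    (PySem.Dict.empty, [])
  (st.2, st.1.items)

-- ===== PORT B =====
def get_shingle_dict_alt (tokens_list : List (List String)) : List (List Int) × (List (String × Int)) :=
  -- flat = [t for ts in tokens_list for t in ts]
  let flat := tokens_list.flatMap (fun ts => ts)
  -- dict.fromkeys(flat): unit-valued dict, keys = first occurrences in order
  let vocab := (flat.foldl (fun (d : PySem.Dict String Unit) t => d.insert t ()) PySem.Dict.empty).keys
  -- {t: i for i, t in enumerate(vocab)}
  let db := (PySem.List.enumerate vocab 0).foldl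
      (fun (d : PySem.Dict String Int) p => d.insert p.2 p.1) PySem.Dict.empty
  -- db[t]: every flattened token is a key of db, so getD … 0 is exact here
  (tokens_list.map (fun ts => PySem.Set.ofList (ts.map (fun t => PySem.Dict.getD db t 0))),
   db.items)

-- ===== PRECONDITION & SPEC =====
def Spec_get_shingle_dict (tokens_list : List (List String)) (out : List (List Int) × (List (String × Int))) : Prop := out = get_shingle_dict_alt tokens_list
instance (tokens_list : List (List String)) (out : List (List Int) × (List (String × Int))) : Decidable (Spec_get_shingle_dict tokens_list out) := by unfold Spec_get_shingle_dict; infer_instance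

-- ===== CLAIM (what is proved, stated in full; the proofs are below) =====
def Claim_equal_get_shingle_dict : Prop := ∀ (tokens_list : List (List String)), Dom_get_shingle_dict tokens_list → Spec_get_shingle_dict tokens_list (get_shingle_dict tokens_list)

-- ===== LEMMAS AND PROOFS =====

-- proof-side name for A's per-token dictionary step
def pvStep (d : PySem.Dict String Int) (t : String) : PySem.Dict String Int :=
  if d.contains t then d else d.insert t (d.size : Int)

-- proof-side name for B's enumerate-comprehension dict over a key list
def pvToIdx (ks : List String) : PySem.Dict String Int :=
  (PySem.List.enumerate ks 0).foldl (fun d p => d.insert p.2 p.1) PySem.Dict.empty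

-- "d' preserves every binding of d"
def pvExt (d d' : PySem.Dict String Int) : Prop :=
  ∀ k v, d.get? k = some v → d'.get? k = some v

lemma pvStep_pres {d : PySem.Dict String Int} {k : String} {v : Int} (t : String)
    (h : d.get? k = some v) : (pvStep d t).get? k = some v := by
  unfold pvStep
  split
  · exact h
  · rcases eq_or_ne k t with rfl | hne
    · rename_i hc
      rw [PySem.Dict.contains_eq_isSome_get?, h] at hc
      simp at hc
    · rw [PySem.Dict.get?_insert]
      simp [hne, h]

lemma pvFold_pres {d : PySem.Dict String Int} {k : String} {v : Int} (l : List String)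
    (h : d.get? k = some v) : (l.foldl pvStep d).get? k = some v := by
  induction l generalizing d with
  | nil => exact h
  | cons t l ih => exact ih (pvStep_pres t h)

lemma pvStep_self (d : PySem.Dict String Int) (t : String) :
    ∃ v, (pvStep d t).get? t = some v := by
  unfold pvStep
  split
  · rename_i hc
    rw [PySem.Dict.contains_eq_isSome_get?] at hc
    exact Option.isSome_iff_exists.mp hc
  · exact ⟨_, PySem.Dict.get?_insert_self _ _ _⟩

lemma pvInner_eq (l : List String) (db0 : PySem.Dict String Int) (sh : PySem.Set Int)
    (dbF : PySem.Dict String Int) (h : pvExt (l.foldl pvStep db0) dbF) :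
    l.foldl
      (fun (st2 : PySem.Dict String Int × PySem.Set Int) token =>
        (if st2.1.contains token = true then st2.1 else st2.1.insert token (st2.1.size : Int),
         PySem.Set.add st2.2 (PySem.Dict.getD
           (if st2.1.contains token = true then st2.1 else st2.1.insert token (st2.1.size : Int)) token 0)))
      (db0, sh)
    = (l.foldl pvStep db0,
       (l.map (fun t => PySem.Dict.getD dbF t 0)).foldl PySem.Set.add sh) := by
  induction l generalizing db0 sh with
  | nil => rfl
  | cons t l ih =>
    obtain ⟨v, hv⟩ := pvStep_self db0 t
    have hF : dbF.get? t = some v := h t v (pvFold_pres l hv)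
    have hval : PySem.Dict.getD (pvStep db0 t) t 0 = PySem.Dict.getD dbF t 0 := by
      rw [PySem.Dict.getD_eq_get?_getD, PySem.Dict.getD_eq_get?_getD, hv, hF]
    simp only [List.foldl_cons, List.map_cons]
    rw [show PySem.Dict.getD
          (if db0.contains t = true then db0 else db0.insert t (db0.size : Int)) t 0
        = PySem.Dict.getD dbF t 0 from hval]
    exact ih (pvStep db0 t) _ h

lemma pvOuter_eq (tl : List (List String)) (db0 : PySem.Dict String Int)
    (acc : List (List Int)) (dbF : PySem.Dict String Int)
    (h : pvExt ((tl.flatMap (fun ts => ts)).foldl pvStep db0) dbF) :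
    tl.foldl
      (fun (st : PySem.Dict String Int × List (List Int)) tokens =>
        ((tokens.foldl
            (fun (st2 : PySem.Dict String Int × PySem.Set Int) token =>
              (if st2.1.contains token = true then st2.1 else st2.1.insert token (st2.1.size : Int),
               PySem.Set.add st2.2 (PySem.Dict.getD
                 (if st2.1.contains token = true then st2.1 else st2.1.insert token (st2.1.size : Int)) token 0)))
            (st.1, PySem.Set.empty)).1,
         st.2 ++ [(tokens.foldl
            (fun (st2 : PySem.Dict String Int × PySem.Set Int) token =>
              (if st2.1.contains token = true then st2.1 else st2.1.insert token (st2.1.size : Int),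
               PySem.Set.add st2.2 (PySem.Dict.getD
                 (if st2.1.contains token = true then st2.1 else st2.1.insert token (st2.1.size : Int)) token 0)))
            (st.1, PySem.Set.empty)).2]))
      (db0, acc)
    = ((tl.flatMap (fun ts => ts)).foldl pvStep db0,
       acc ++ tl.map (fun tokens =>
         PySem.Set.ofList (tokens.map (fun t => PySem.Dict.getD dbF t 0)))) := by
  induction tl generalizing db0 acc with
  | nil => simp
  | cons tokens tl ih =>
    have hext : pvExt (tokens.foldl pvStep db0) dbF := fun k v hv => by
      apply h
      rw [List.flatMap_cons, List.foldl_append]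
      exact pvFold_pres _ hv
    simp only [List.foldl_cons, List.map_cons]
    rw [pvInner_eq tokens db0 PySem.Set.empty dbF hext]
    refine (ih (List.foldl pvStep db0 tokens)
      (acc ++ [List.foldl PySem.Set.add PySem.Set.empty
        (List.map (fun t => PySem.Dict.getD dbF t 0) tokens)])
      (by intro k v hv; apply h; rwa [List.flatMap_cons, List.foldl_append])).trans ?_
    simp [PySem.Set.ofList_eq_foldl, List.flatMap_cons, List.foldl_append]

lemma pvItems_toIdx (ks : List String) (h : ks.Nodup) :
    (pvToIdx ks).items = (PySem.List.enumerate ks 0).map (fun p => (p.2, p.1)) := by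
  unfold pvToIdx
  have := PySem.Dict.items_foldl_insert_fresh (l := PySem.List.enumerate ks 0)
    (k := fun p => p.2) (v := fun p => p.1) (d := PySem.Dict.empty)
    (by intro a _; exact PySem.Dict.contains_empty _)
    (by rw [PySem.List.map_snd_enumerate]; exact h)
  simpa using this

lemma pvKeys_toIdx (ks : List String) (h : ks.Nodup) : (pvToIdx ks).keys = ks := by
  simp only [PySem.Dict.keys, pvItems_toIdx ks h, List.map_map]
  exact PySem.List.map_snd_enumerate ks 0

lemma pvToIdx_snoc (ks : List String) (t : String) :
    pvToIdx (ks ++ [t]) = (pvToIdx ks).insert t (ks.length : Int) := by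
  unfold pvToIdx
  rw [PySem.List.enumerate_append, List.foldl_append]
  simp [PySem.List.enumerate_cons]

lemma pvFold_toIdx (l : List String) : ∀ (ks : List String), ks.Nodup →
    l.foldl pvStep (pvToIdx ks) = pvToIdx (PySem.Set.update ks l) := by
  induction l with
  | nil => intro ks _; simp [PySem.Set.update]
  | cons t l ih =>
    intro ks hnd
    rw [List.foldl_cons, PySem.Set.update_cons]
    have hc : (pvToIdx ks).contains t = decide (t ∈ ks) := by
      rw [PySem.Dict.contains_eq_decide_mem_keys, pvKeys_toIdx ks hnd]
    by_cases hm : t ∈ ks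
    · have : pvStep (pvToIdx ks) t = pvToIdx ks := by
        unfold pvStep; rw [hc]; simp [hm]
      rw [this, PySem.Set.add_of_mem hm]
      exact ih ks hnd
    · have hsz : (pvToIdx ks).size = ks.length := by
        have := congrArg List.length (pvKeys_toIdx ks hnd)
        simpa [PySem.Dict.keys] using this
      have : pvStep (pvToIdx ks) t = pvToIdx (ks ++ [t]) := by
        unfold pvStep; rw [hc]
        simp [hm, pvToIdx_snoc, hsz]
      rw [this, PySem.Set.add_of_not_mem hm]
      exact ih (ks ++ [t]) (by simp [List.nodup_append, hnd]; intro a ha h; exact hm (h ▸ ha))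

-- A's incrementally built dict IS B's enumerate dict over the deduped flat stream
lemma pvDict_eq (flat : List String) :
    flat.foldl pvStep PySem.Dict.empty = pvToIdx (PySem.Set.ofList flat) := by
  have h0 : pvToIdx [] = PySem.Dict.empty := rfl
  have := pvFold_toIdx flat [] List.nodup_nil
  rw [h0] at this
  rw [this, PySem.Set.update_nil_left]

lemma pvVocab_eq (flat : List String) :
    (flat.foldl (fun (d : PySem.Dict String Unit) t => d.insert t ()) PySem.Dict.empty).keys
      = PySem.Set.ofList flat := by
  rw [PySem.Dict.keys_foldl_insert]
  simp [PySem.Set.update_nil_left, PySem.Dict.keys_empty]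

-- ===== VERDICT (by name: the statement is the Claim_ definition above) =====
theorem get_shingle_dict_spec : Claim_equal_get_shingle_dict := by
  intro tokens_list _
  unfold Spec_get_shingle_dict
  simp only [get_shingle_dict, get_shingle_dict_alt]
  rw [pvVocab_eq]
  rw [show (PySem.List.enumerate (PySem.Set.ofList (tokens_list.flatMap fun ts => ts)) 0).foldl
        (fun (d : PySem.Dict String Int) p => d.insert p.2 p.1) PySem.Dict.empty
      = pvToIdx (PySem.Set.ofList (tokens_list.flatMap fun ts => ts)) from rfl]
  rw [pvOuter_eq tokens_list PySem.Dict.empty []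
      (pvToIdx (PySem.Set.ofList (tokens_list.flatMap fun ts => ts)))
      (by intro k v hv; rwa [pvDict_eq] at hv)]
  simp only [List.nil_append]
  rw [pvDict_eq]
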